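-- pv_equiv track=rewrite | github.com/med13foundation/monorepo | src/application/agents/services/_hypothesis_transfer_support.py | normalize_text_tokens
-- ===== SOURCE A (Python) =====
-- _TOKEN_MIN_LENGTH = 3
--
-- def normalize_text_tokens(value: str | None) -> frozenset[str]:
--     """Return uppercase alphanumeric tokens for simple overlap matching."""
--     if value is None:
--         return frozenset()
--     normalized = "".join(
--         character if character.isalnum() else " " for character in value.upper()
--     )
--     return frozenset(
--         token for token in normalized.split() if len(token) >= _TOKEN_MIN_LENGTH
--     )
-- ===== SOURCE B (Python) =====
-- _TOKEN_MIN_LENGTH = 3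
--
-- def normalize_text_tokens(value):
--     """Return uppercase alphanumeric tokens for simple overlap matching.
--
--     Single pass: tokenize directly with a character buffer instead of
--     building a normalized string and splitting it.
--     """
--     if value is None:
--         return frozenset()
--     tokens = set()
--     buffer = []
--     for character in value.upper():
--         if character.isalnum():
--             buffer.append(character)
--         else:
--             if len(buffer) >= _TOKEN_MIN_LENGTH:
--                 tokens.add("".join(buffer))
--             buffer = []
--     if len(buffer) >= _TOKEN_MIN_LENGTH:
--         tokens.add("".join(buffer))
--     return frozenset(tokens)
-- ===== Notes on version B (the rewrite author's own statement) =====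
-- stated objective: alternative
-- what changed: B tokenizes in a single pass with a character buffer (flush on non-alnum, add to set if length >= 3), instead of A's pipeline that builds a space-normalized copy of the string and then splits it.
import Mathlib
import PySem

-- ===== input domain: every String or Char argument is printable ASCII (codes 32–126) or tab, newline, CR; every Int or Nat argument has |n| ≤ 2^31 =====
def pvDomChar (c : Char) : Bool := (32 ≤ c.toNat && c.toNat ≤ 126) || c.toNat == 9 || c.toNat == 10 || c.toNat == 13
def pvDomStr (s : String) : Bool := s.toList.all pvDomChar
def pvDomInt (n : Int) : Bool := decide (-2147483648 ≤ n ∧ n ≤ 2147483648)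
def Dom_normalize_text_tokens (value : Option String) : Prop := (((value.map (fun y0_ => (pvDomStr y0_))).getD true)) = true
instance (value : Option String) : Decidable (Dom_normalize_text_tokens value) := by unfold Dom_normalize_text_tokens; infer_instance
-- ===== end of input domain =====

-- B replaces A's build-normalized-string-then-split pipeline by one direct pass with a
-- character buffer; same result, different decomposition (objective: alternative).

-- ===== PORT A =====
-- ''.join(c if c.isalnum() else ' ' for c in value.upper()) is ported character-for-character:
-- joining one-character strings yields exactly this mapped character list (exact).
def normalize_text_tokens (value : Option String) : List String :=
  match value with
  | none => PySem.Set.empty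
  | some v =>
    let normalized : List Char :=
      (PySem.Chars.upper v.toList).map
        (fun character => if PySem.Chars.isalnum character then character else ' ')
    PySem.Set.ofList
      (((PySem.Chars.split₀ normalized).map (fun t => String.ofList t)).filter
        (fun token => decide (3 ≤ PySem.Str.len token)))

-- ===== PORT B =====
def pvAltStep (st : List Char × PySem.Set String) (character : Char) :
    List Char × PySem.Set String :=
  if PySem.Chars.isalnum character then (st.1 ++ [character], st.2)
  else if 3 ≤ st.1.length then ([], PySem.Set.add st.2 (String.ofList st.1))
  else ([], st.2)

def normalize_text_tokens_alt (value : Option String) : List String :=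
  match value with
  | none => PySem.Set.empty
  | some v =>
    let st := (PySem.Chars.upper v.toList).foldl pvAltStep ([], PySem.Set.empty)
    if 3 ≤ st.1.length then PySem.Set.add st.2 (String.ofList st.1) else st.2

-- ===== PRECONDITION & SPEC =====
def Spec_normalize_text_tokens (value : Option String) (out : List String) : Prop := out = normalize_text_tokens_alt value
instance (value : Option String) (out : List String) : Decidable (Spec_normalize_text_tokens value out) := by unfold Spec_normalize_text_tokens; infer_instance

-- ===== CLAIM (what is proved, stated in full; the proofs are below) =====
def Claim_equal_normalize_text_tokens : Prop := ∀ (value : Option String), Dom_normalize_text_tokens value → Spec_normalize_text_tokens value (normalize_text_tokens value)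

-- ===== LEMMAS AND PROOFS =====

-- reference tokenizer: maximal alnum runs of u, with `cur` the reversed current buffer
def pvTok : List Char → List Char → List (List Char)
  | [], cur => if cur.isEmpty then [] else [cur.reverse]
  | c :: rest, cur =>
    if PySem.Chars.isalnum c then pvTok rest (c :: cur)
    else if cur.isEmpty then pvTok rest []
    else cur.reverse :: pvTok rest []

theorem pv_isspace_of_isalnum (c : Char) (h : PySem.Chars.isalnum c = true) :
    PySem.Chars.isspace c = false := by
  simp only [PySem.Chars.isalnum, PySem.Chars.isalpha, PySem.Chars.isdigit, PySem.Chars.isupper,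
    PySem.Chars.islower, PySem.Chars.isspace, Char.le_def, UInt32.le_iff_toNat_le, Char.toNat_val,
    Bool.or_eq_true, Bool.and_eq_true, (by decide : 'A'.toNat = 65), (by decide : 'Z'.toNat = 90),
    (by decide : 'a'.toNat = 97), (by decide : 'z'.toNat = 122),
    (by decide : '0'.toNat = 48), (by decide : '9'.toNat = 57),
    decide_eq_true_eq, Bool.or_eq_false_iff, Bool.and_eq_false_iff, decide_eq_false_iff_not] at *
  omega

theorem pv_go_eq_tok (u : List Char) : ∀ (cur : List Char) (acc : List (List Char)),
    PySem.Chars.split₀.go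
      (u.map (fun c => if PySem.Chars.isalnum c then c else ' ')) cur acc
      = acc.reverse ++ pvTok u cur := by
  induction u with
  | nil => intro cur acc; by_cases h : cur.isEmpty <;>
      simp [PySem.Chars.split₀.go, pvTok, h]
  | cons c rest ih =>
    intro cur acc
    by_cases h : PySem.Chars.isalnum c
    · simp [PySem.Chars.split₀.go, pvTok, h, pv_isspace_of_isalnum c h, ih]
    · simp only [List.map_cons, if_neg h]
      by_cases hc : cur.isEmpty <;>
        simp [PySem.Chars.split₀.go, pvTok, h, hc,
          (by decide : PySem.Chars.isspace ' ' = true), ih]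

theorem pv_foldl_eq_tok (u : List Char) : ∀ (buf : List Char) (s : PySem.Set String),
    (if 3 ≤ (u.foldl pvAltStep (buf, s)).1.length then
       PySem.Set.add (u.foldl pvAltStep (buf, s)).2 (String.ofList (u.foldl pvAltStep (buf, s)).1)
     else (u.foldl pvAltStep (buf, s)).2)
      = ((pvTok u buf.reverse).filter (fun t => decide (3 ≤ t.length))).foldl
          (fun s t => PySem.Set.add s (String.ofList t)) s := by
  induction u with
  | nil =>
    intro buf s
    by_cases h : 3 ≤ buf.length
    · have : buf ≠ [] := by intro he; simp [he] at h
      simp [pvTok, h, this]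
    · by_cases he : buf = [] <;> simp [pvTok, h, he]
  | cons c rest ih =>
    intro buf s
    by_cases h : PySem.Chars.isalnum c
    · have := ih (buf ++ [c]) s
      simpa [pvTok, h, pvAltStep] using this
    · by_cases hl : 3 ≤ buf.length
      · have hne : buf ≠ [] := by intro he; simp [he] at hl
        simp [pvTok, h, hl, hne, pvAltStep, ih [] (PySem.Set.add s (String.ofList buf))]
      · by_cases he : buf = [] <;>
          simp [pvTok, h, hl, he, pvAltStep, ih [] s]

-- ===== VERDICT (by name: the statement is the Claim_ definition above) =====
theorem normalize_text_tokens_spec : Claim_equal_normalize_text_tokens := by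
  intro value _
  unfold Spec_normalize_text_tokens normalize_text_tokens normalize_text_tokens_alt
  cases value with
  | none => rfl
  | some v =>
    have hp : ((fun token => decide (3 ≤ PySem.Str.len token)) ∘ fun t : List Char => String.ofList t)
        = (fun t : List Char => decide (3 ≤ t.length)) := by
      funext t; simp [PySem.Str.len_eq, String.length_ofList]
    simp only [PySem.Chars.split₀, pv_go_eq_tok, List.reverse_nil, List.nil_append,
      PySem.Set.ofList_eq_foldl, List.filter_map, List.foldl_map, hp,
      pv_foldl_eq_tok (PySem.Chars.upper v.toList) [] PySem.Set.empty]
    rfl
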